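-- pv_equiv track=rewrite | github.com/SiddharthaChakrabarty/Fixella | backend/index.py | synthesize_steps_from_retrievals
-- ===== SOURCE A (Python) =====
-- from typing import List, Dict, Any, Optional, Tuple
--
-- def synthesize_steps_from_retrievals(retrievals: List[Dict[str, Any]], max_steps: int = 8) -> List[str]:
--     seen = {}
--     order = []
--     for r in retrievals:
--         for step in r.get("resolutionSteps", []) or []:
--             normalized = step.strip()
--             if normalized not in seen:
--                 seen[normalized] = 0
--                 order.append(normalized)
--             seen[normalized] += 1
--     ordered = sorted(order, key=lambda s: (-seen[s], order.index(s)))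
--     return ordered[:max_steps]
-- ===== SOURCE B (Python) =====
-- def synthesize_steps_from_retrievals(retrievals, max_steps=8):
--     counts = {}
--     for r in retrievals:
--         for step in r.get("resolutionSteps", []) or []:
--             s = step.strip()
--             counts[s] = counts.get(s, 0) + 1
--     if not counts:
--         return []
--     # pigeonhole/counting sort: group steps by frequency, then walk the
--     # frequencies from the highest down; insertion order gives the
--     # first-seen tie-break for free, no comparison sort at all.
--     buckets = {}
--     for s, c in counts.items():
--         buckets[c] = buckets.get(c, []) + [s]
--     result = []
--     for c in range(max(counts.values()), 0, -1):
--         result.extend(buckets.get(c, []))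
--     return result[:max_steps]
-- ===== Notes on version B (the rewrite author's own statement) =====
-- stated objective: alternative
-- what changed: Replaces A's comparison sort with the compound key (-count, order.index) (quadratic order.index scans inside the sort) by a pigeonhole/counting sort: steps are grouped into buckets keyed by frequency and emitted by walking the frequencies from the highest down, with insertion order supplying the first-seen tie-break.
import Mathlib
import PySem

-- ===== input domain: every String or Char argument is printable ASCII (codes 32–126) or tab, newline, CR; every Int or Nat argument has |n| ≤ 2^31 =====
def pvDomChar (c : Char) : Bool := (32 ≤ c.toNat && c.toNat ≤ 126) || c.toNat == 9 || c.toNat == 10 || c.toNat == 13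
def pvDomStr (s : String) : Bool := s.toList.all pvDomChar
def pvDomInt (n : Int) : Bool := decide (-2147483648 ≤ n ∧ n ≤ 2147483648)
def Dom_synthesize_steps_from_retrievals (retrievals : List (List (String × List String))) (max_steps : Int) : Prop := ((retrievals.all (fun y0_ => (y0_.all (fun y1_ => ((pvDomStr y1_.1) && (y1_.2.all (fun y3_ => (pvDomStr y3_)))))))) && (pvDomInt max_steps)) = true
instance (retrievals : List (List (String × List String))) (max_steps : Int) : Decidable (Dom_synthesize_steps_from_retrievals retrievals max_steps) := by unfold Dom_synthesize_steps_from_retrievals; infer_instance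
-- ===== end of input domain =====

-- B replaces A's comparison sort with compound key (-count, order.index) by a
-- pigeonhole/counting sort: group the counted steps into buckets by frequency and
-- walk the frequencies from the highest down (alternative algorithm, no comparison
-- sort; same return value everywhere).


-- ===== PORT A =====
-- r.get("resolutionSteps", []) or []   (identical expression in both Pythons)
def pvGetSteps (r : List (String × List String)) : List String :=
  let steps := (PySem.Dict.mk r).getD "resolutionSteps" []
  if steps.isEmpty then [] else steps

-- the inner `for step in …` loop of A over one retrieval's steps
def pvLoopA (st : PySem.Dict String Int × List String) (steps : List String) :
    PySem.Dict String Int × List String :=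
  steps.foldl (fun p step =>
    let normalized := PySem.Str.strip step
    let p := if p.1.contains normalized then p else (p.1.insert normalized 0, p.2 ++ [normalized])
    -- seen[normalized] += 1 : the key is present here, so getD's default is unreachable
    (p.1.insert normalized (p.1.getD normalized 0 + 1), p.2)) st

def synthesize_steps_from_retrievals (retrievals : List (List (String × List String))) (max_steps : Int) : List String :=
  let st := retrievals.foldl (fun st r => pvLoopA st (pvGetSteps r)) (PySem.Dict.empty, [])
  let seen := st.1
  let order := st.2
  -- key = (-seen[s], order.index(s)); s is always a key of seen and a member of order,
  -- so the getD defaults are unreachable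
  let ordered := PySem.List.sorted2 order
    (fun s => -(seen.getD s 0)) (fun s => (PySem.List.index? order s).getD 0) false
  PySem.List.slice ordered none (some max_steps)

-- ===== PORT B =====
-- the counting loop of B: counts[s] = counts.get(s, 0) + 1
def pvLoopB (d : PySem.Dict String Int) (steps : List String) : PySem.Dict String Int :=
  steps.foldl (fun d step =>
    let s := PySem.Str.strip step
    d.insert s (d.getD s 0 + 1)) d

def synthesize_steps_from_retrievals_alt (retrievals : List (List (String × List String))) (max_steps : Int) : List String :=
  let counts := retrievals.foldl (fun d r => pvLoopB d (pvGetSteps r)) PySem.Dict.empty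
  -- if not counts: return []
  if counts.items.isEmpty then []
  else
    -- buckets[c] = buckets.get(c, []) + [s]
    let buckets := counts.items.foldl (fun b p => b.modify p.2 [] (fun l => l ++ [p.1])) PySem.Dict.empty
    -- max(counts.values()): counts is nonempty on this branch, so max? is some (the getD default is unreachable)
    let m := (PySem.List.max? counts.values (fun v => v)).getD 0
    -- for c in range(m, 0, -1): result.extend(buckets.get(c, []))
    let result := (PySem.List.pyRange m 0 (-1)).foldl (fun acc c => acc ++ buckets.getD c []) []
    PySem.List.slice result none (some max_steps)

-- ===== PRECONDITION & SPEC =====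
def Spec_synthesize_steps_from_retrievals (retrievals : List (List (String × List String))) (max_steps : Int) (out : List String) : Prop := out = synthesize_steps_from_retrievals_alt retrievals max_steps
instance (retrievals : List (List (String × List String))) (max_steps : Int) (out : List String) : Decidable (Spec_synthesize_steps_from_retrievals retrievals max_steps out) := by unfold Spec_synthesize_steps_from_retrievals; infer_instance

-- ===== CLAIM (what is proved, stated in full; the proofs are below) =====
def Claim_equal_synthesize_steps_from_retrievals : Prop := ∀ (retrievals : List (List (String × List String))) (max_steps : Int), Dom_synthesize_steps_from_retrievals retrievals max_steps → Spec_synthesize_steps_from_retrievals retrievals max_steps (synthesize_steps_from_retrievals retrievals max_steps)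

-- ===== LEMMAS AND PROOFS =====

-- A's loop state is (B's counting dict, its key list), keys nodup
theorem pvStep_invariant (d : PySem.Dict String Int) (s : String) :
    ((if d.contains s then (d, d.keys) else (d.insert s 0, d.keys ++ [s])).1.insert s
        ((if d.contains s then (d, d.keys) else (d.insert s 0, d.keys ++ [s])).1.getD s 0 + 1),
      (if d.contains s then (d, d.keys) else (d.insert s 0, d.keys ++ [s])).2)
      = (d.insert s (d.getD s 0 + 1), (d.insert s (d.getD s 0 + 1)).keys) := by
  cases h : d.contains s with
  | true =>
    simp only [reduceIte]
    rw [PySem.Dict.keys_insert_of_contains d (d.getD s 0 + 1) h]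
  | false =>
    simp only [Bool.false_eq_true, if_false]
    rw [PySem.Dict.getD_insert_self, PySem.Dict.insert_insert_self,
        PySem.Dict.getD_of_not_contains d 0 h,
        PySem.Dict.keys_insert_of_not_contains d _ h]

theorem pvLoop_invariant (steps : List String) (d : PySem.Dict String Int) (hnd : d.keys.Nodup) :
    pvLoopA (d, d.keys) steps = (pvLoopB d steps, (pvLoopB d steps).keys) := by
  induction steps generalizing d with
  | nil => rfl
  | cons step rest ih =>
    simp only [pvLoopA, pvLoopB, List.foldl_cons]
    have h1 := pvStep_invariant d (PySem.Str.strip step)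
    have h2 : (d.insert (PySem.Str.strip step) (d.getD (PySem.Str.strip step) 0 + 1)).keys.Nodup :=
      PySem.Dict.nodup_keys_insert _ _ _ hnd
    simpa only [pvLoopA, pvLoopB] using h1 ▸ ih _ h2

theorem pvLoop_nodup (steps : List String) (d : PySem.Dict String Int) (hnd : d.keys.Nodup) :
    (pvLoopB d steps).keys.Nodup := by
  induction steps generalizing d with
  | nil => exact hnd
  | cons step rest ih =>
    exact ih _ (PySem.Dict.nodup_keys_insert _ _ _ hnd)

theorem pvFold_invariant (retrievals : List (List (String × List String))) :
    retrievals.foldl (fun st r => pvLoopA st (pvGetSteps r)) (PySem.Dict.empty, [])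
      = (retrievals.foldl (fun d r => pvLoopB d (pvGetSteps r)) PySem.Dict.empty,
         (retrievals.foldl (fun d r => pvLoopB d (pvGetSteps r)) PySem.Dict.empty).keys)
    ∧ (retrievals.foldl (fun d r => pvLoopB d (pvGetSteps r)) PySem.Dict.empty).keys.Nodup := by
  suffices h : ∀ (d : PySem.Dict String Int), d.keys.Nodup →
      retrievals.foldl (fun st r => pvLoopA st (pvGetSteps r)) (d, d.keys)
        = (retrievals.foldl (fun d r => pvLoopB d (pvGetSteps r)) d,
           (retrievals.foldl (fun d r => pvLoopB d (pvGetSteps r)) d).keys)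
      ∧ (retrievals.foldl (fun d r => pvLoopB d (pvGetSteps r)) d).keys.Nodup by
    have := h PySem.Dict.empty (by simp [PySem.Dict.keys_empty])
    simpa [PySem.Dict.keys_empty] using this
  induction retrievals with
  | nil => exact fun d hnd => ⟨rfl, hnd⟩
  | cons r rest ih =>
    intro d hnd
    simp only [List.foldl_cons]
    rw [pvLoop_invariant _ _ hnd]
    exact ih _ (pvLoop_nodup _ _ hnd)

-- getD of the full counting fold = number of occurrences in the flattened stripped steps
theorem pvCounts_getD (retrievals : List (List (String × List String)))
    (d : PySem.Dict String Int) (v : String) :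
    (retrievals.foldl (fun d r => pvLoopB d (pvGetSteps r)) d).getD v 0
      = d.getD v 0 + ((retrievals.flatMap (fun r => (pvGetSteps r).map PySem.Str.strip)).count v : Int) := by
  induction retrievals generalizing d with
  | nil => simp
  | cons r rest ih =>
    simp only [List.foldl_cons, List.flatMap_cons, List.count_append]
    rw [ih]
    have : pvLoopB d (pvGetSteps r)
        = ((pvGetSteps r).map PySem.Str.strip).foldl (fun d x => d.insert x (d.getD x 0 + 1)) d := by
      rw [List.foldl_map]; rfl
    rw [this, PySem.Dict.getD_foldl_insert_add_one]
    push_cast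
    ring

-- every key of the counting fold occurs in the flattened stripped steps
theorem pvCounts_keys_sub (retrievals : List (List (String × List String)))
    (d : PySem.Dict String Int) (s : String) :
    s ∈ (retrievals.foldl (fun d r => pvLoopB d (pvGetSteps r)) d).keys →
      s ∈ d.keys ∨ s ∈ retrievals.flatMap (fun r => (pvGetSteps r).map PySem.Str.strip) := by
  induction retrievals generalizing d with
  | nil => exact fun h => Or.inl h
  | cons r rest ih =>
    intro h
    simp only [List.foldl_cons] at h
    rcases ih _ h with h' | h'
    · have : pvLoopB d (pvGetSteps r)
          = ((pvGetSteps r).map PySem.Str.strip).foldl (fun d x => d.insert x (d.getD x 0 + 1)) d := by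
        rw [List.foldl_map]; rfl
      rw [this, PySem.Dict.keys_foldl_insert] at h'
      rcases (PySem.Set.mem_update _ _ _).1 h' with h'' | h''
      · exact Or.inl h''
      · exact Or.inr (by simp [List.mem_flatMap]; exact Or.inl (by simpa using h''))
    · exact Or.inr (by simp [List.mem_flatMap] at h' ⊢; tauto)

-- first-seen position is strictly increasing along a nodup list
theorem pvPairwise_index (ks : List String) (hnd : ks.Nodup) :
    ks.Pairwise (fun a b =>
      (PySem.List.index? ks a).getD 0 < (PySem.List.index? ks b).getD 0) := by
  rw [List.pairwise_iff_getElem]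
  intro i j hi hj hij
  have ha : PySem.List.index? ks ks[i] = some i := by
    rw [PySem.List.index?_eq_idxOf?, List.idxOf?_eq_some_iff]
    exact ⟨hi, rfl, fun j hj hja => by
      have := (List.Nodup.getElem_inj_iff hnd).1 hja; omega⟩
  have hb : PySem.List.index? ks ks[j] = some j := by
    rw [PySem.List.index?_eq_idxOf?, List.idxOf?_eq_some_iff]
    exact ⟨hj, rfl, fun l hl hla => by
      have := (List.Nodup.getElem_inj_iff hnd).1 hla; omega⟩
  rw [ha, hb]
  simpa using hij

theorem pvIndex_lt (ks : List String) (s : String) (hs : s ∈ ks) :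
    (PySem.List.index? ks s).getD 0 < ks.length := by
  cases h : PySem.List.index? ks s with
  | none =>
    rw [PySem.List.index?_eq_idxOf?] at h
    exact absurd (List.idxOf?_eq_none_iff.1 h) (by simpa using hs)
  | some i =>
    rw [PySem.List.index?_eq_idxOf?, List.idxOf?_eq_some_iff] at h
    simpa using h.1

-- packing the lexicographic pair (x1, x2) with 0 ≤ x2 < N into x1*N + x2
theorem pvPack_lt (x1 y1 : Int) (x2 y2 N : Nat) (hx : x2 < N) (hy : y2 < N) :
    (x1 < y1 ∨ (¬ y1 < x1 ∧ x2 < y2)) ↔ x1 * N + (x2 : Int) < y1 * N + (y2 : Int) := by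
  rcases lt_trichotomy x1 y1 with h | h | h
  · constructor
    · intro _
      have h1 : x1 + 1 ≤ y1 := h
      have h2 : (x1 + 1) * (N : Int) ≤ y1 * N :=
        mul_le_mul_of_nonneg_right h1 (by positivity)
      nlinarith
    · intro _; exact Or.inl h
  · subst h
    constructor
    · rintro (h' | ⟨_, h'⟩)
      · exact absurd h' (lt_irrefl _)
      · omega
    · intro h'
      exact Or.inr ⟨lt_irrefl _, by omega⟩
  · constructor
    · rintro (h' | ⟨h', _⟩)
      · exact absurd (h'.trans h) (lt_irrefl _)
      · exact absurd h h'
    · intro h'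
      exfalso
      have h1 : y1 + 1 ≤ x1 := h
      have h2 : (y1 + 1) * (N : Int) ≤ x1 * N :=
        mul_le_mul_of_nonneg_right h1 (by positivity)
      nlinarith

-- insertBy only compares the inserted element with members of the list
theorem pvInsertBy_congr {α : Type} (f g : α → α → Bool) (x : α) (ys : List α)
    (h : ∀ y ∈ ys, f x y = g x y) :
    PySem.List.insertBy f x ys = PySem.List.insertBy g x ys := by
  induction ys with
  | nil => rfl
  | cons y t ih =>
    simp only [PySem.List.insertBy]
    rw [h y (by simp)]
    split
    · rfl
    · rw [ih (fun z hz => h z (by simp [hz]))]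

theorem pvMem_insertBy {α : Type} (f : α → α → Bool) (x : α) (ys : List α)
    (z : α) (hz : z ∈ PySem.List.insertBy f x ys) : z = x ∨ z ∈ ys := by
  exact (PySem.List.mem_insertBy (before := f) (x := x) (ys := ys) (y := z)).1 hz

-- two insertion sorts agree if the comparators agree on every (later, earlier) pair
theorem pvFoldl_insertBy_congr {α : Type} (f g : α → α → Bool) (xs : List α) :
    ∀ acc : List α, (∀ x ∈ xs, ∀ y ∈ acc, f x y = g x y) →
    xs.Pairwise (fun a b => f b a = g b a) →
    xs.foldl (fun acc x => PySem.List.insertBy f x acc) acc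
      = xs.foldl (fun acc x => PySem.List.insertBy g x acc) acc := by
  induction xs with
  | nil => intro acc _ _; rfl
  | cons x rest ih =>
    intro acc hacc hpw
    simp only [List.foldl_cons]
    rw [pvInsertBy_congr f g x acc (hacc x (by simp))]
    have hpw' := List.pairwise_cons.1 hpw
    refine ih _ ?_ hpw'.2
    intro z hz y hy
    rcases pvMem_insertBy g x acc y hy with rfl | hy'
    · exact hpw'.1 z hz
    · exact hacc z (by simp [hz]) y hy'

-- A's tuple-key sort equals the sort by the packed injective key -cnt*N + index
theorem pvSort2_eq_packed (ks : List String) (cnt : String → Int) :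
    PySem.List.sorted2 ks (fun s => -(cnt s)) (fun s => (PySem.List.index? ks s).getD 0) false
      = PySem.List.sorted ks
          (fun s => -(cnt s) * ks.length + ((PySem.List.index? ks s).getD 0 : Int)) false := by
  show ks.foldl (fun acc x => PySem.List.insertBy _ x acc) []
      = ks.foldl (fun acc x => PySem.List.insertBy _ x acc) []
  apply pvFoldl_insertBy_congr
  · intro x _ y hy; cases hy
  · apply List.pairwise_of_forall_mem_list
    intro a ha b hb
    have hia := pvIndex_lt ks a ha
    have hib := pvIndex_lt ks b hb
    rw [Bool.eq_iff_iff]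
    simp only [Bool.false_eq_true, if_false, Bool.or_eq_true, Bool.and_eq_true,
      Bool.not_eq_true', decide_eq_true_eq, decide_eq_false_iff_not]
    exact pvPack_lt _ _ _ _ _ hib hia

-- the bucket dict built over (step, count) items, looked up at count c
theorem pvBuckets_getD (items : List (String × Int)) (c : Int) :
    (items.foldl (fun b p => b.modify p.2 [] (fun l => l ++ [p.1])) PySem.Dict.empty).getD c []
      = (items.filter (fun p => p.2 == c)).map (fun p => p.1) := by
  have h : items.foldl (fun b p => b.modify p.2 [] (fun l => l ++ [p.1])) PySem.Dict.empty
      = (items.map Prod.swap).foldl (fun b p => b.modify p.1 [] (fun l => l ++ [p.2]))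
          PySem.Dict.empty := by
    rw [List.foldl_map]
    rfl
  rw [h, PySem.Dict.getD_foldl_modify_append]
  simp [List.filter_map, List.map_map, Function.comp_def, Prod.swap]

-- a list is a permutation of its frequency buckets concatenated over distinct covering values
theorem pvPerm_flatMap_filter (vals : List Int) (xs : List String) (key : String → Int)
    (hnd : vals.Nodup) (hcov : ∀ x ∈ xs, key x ∈ vals) :
    (vals.flatMap (fun v => xs.filter (fun x => key x == v))).Perm xs := by
  induction vals generalizing xs with
  | nil =>
    cases xs with
    | nil => simp
    | cons x t => exact absurd (hcov x (by simp)) (by simp)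
  | cons v vs ih =>
    simp only [List.flatMap_cons]
    have hstep : vs.flatMap (fun w => xs.filter (fun x => key x == w))
        = vs.flatMap (fun w => (xs.filter (fun x => !(key x == v))).filter (fun x => key x == w)) := by
      apply List.flatMap_congr
      intro w hw
      rw [List.filter_filter]
      apply List.filter_congr
      intro x _
      have hvw : w ≠ v := by
        rintro rfl; exact (List.nodup_cons.1 hnd).1 hw
      by_cases hx : key x = w
      · simp [hx, hvw]
      · simp [hx]
    rw [hstep]
    have hperm := ih (xs.filter (fun x => !(key x == v))) (List.nodup_cons.1 hnd).2
      (by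
        intro x hx
        have hx' := List.mem_filter.1 hx
        have := hcov x hx'.1
        simp only [List.mem_cons] at this
        rcases this with h | h
        · exact absurd h (by simpa using hx'.2)
        · exact h)
    exact List.Perm.trans (List.Perm.append_left _ hperm) (List.filter_append_perm _ xs)

-- crossing two buckets: a strictly larger count wins regardless of position
theorem pvPack_cross (c1 c2 i j N : Int) (h : c2 < c1) (hi0 : 0 ≤ i) (hi : i < N) (hj : 0 ≤ j) :
    -c1 * N + i < -c2 * N + j := by
  have hN : 0 < N := lt_of_le_of_lt hi0 hi
  have h1 : (1 : Int) ≤ c1 - c2 := by omega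
  have h2 : (1 : Int) * N ≤ (c1 - c2) * N := mul_le_mul_of_nonneg_right h1 (le_of_lt hN)
  nlinarith

-- ===== VERDICT helper: the main list-level equality =====
theorem pvSorted_eq_buckets (ks : List String) (cnt : String → Int) (m : Int)
    (hnd : ks.Nodup) (hpos : ∀ s ∈ ks, 1 ≤ cnt s) (hmax : ∀ s ∈ ks, cnt s ≤ m) :
    PySem.List.sorted ks
        (fun s => -(cnt s) * ks.length + ((PySem.List.index? ks s).getD 0 : Int)) false
      = (PySem.List.pyRange m 0 (-1)).flatMap (fun c => ks.filter (fun s => cnt s == c)) := by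
  have hrangePw : (PySem.List.pyRange m 0 (-1)).Pairwise (fun a b => b < a) := by
    rw [PySem.List.pyRange_neg_one_eq_reverse, List.pairwise_reverse]
    exact PySem.List.pairwise_lt_pyRange_one _ _
  apply PySem.List.sorted_eq_of_perm_of_pairwise_lt
  · exact pvPerm_flatMap_filter _ _ _
      (hrangePw.imp (fun h => ne_of_gt h))
      (fun x hx => PySem.List.mem_pyRange_neg_one.2 ⟨hpos x hx, hmax x hx⟩)
  · rw [List.flatMap_def, List.pairwise_flatten]
    constructor
    · intro l hl
      rcases List.mem_map.1 hl with ⟨c, _, rfl⟩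
      have := List.Pairwise.sublist
        (List.filter_sublist (p := fun s => cnt s == c) (l := ks)) (pvPairwise_index ks hnd)
      apply this.imp_of_mem
      intro a b ha hb hab
      have ha' := List.mem_filter.1 ha
      have hb' := List.mem_filter.1 hb
      have hca : cnt a = c := by simpa using ha'.2
      have hcb : cnt b = c := by simpa using hb'.2
      rw [hca, hcb]
      have : ((PySem.List.index? ks a).getD 0 : Int) < ((PySem.List.index? ks b).getD 0 : Int) := by
        exact_mod_cast hab
      linarith
    · rw [List.pairwise_map]
      apply hrangePw.imp_of_mem
      intro c1 c2 _ _ h x hx y hy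
      have hx' := List.mem_filter.1 hx
      have hy' := List.mem_filter.1 hy
      have hcx : cnt x = c1 := by simpa using hx'.2
      have hcy : cnt y = c2 := by simpa using hy'.2
      rw [hcx, hcy]
      exact pvPack_cross c1 c2 _ _ _ h (by positivity)
        (by exact_mod_cast pvIndex_lt ks x hx'.1) (by positivity)

-- ===== VERDICT (by name: the statement is the Claim_ definition above) =====
theorem synthesize_steps_from_retrievals_spec : Claim_equal_synthesize_steps_from_retrievals := by
  intro retrievals max_steps _
  show synthesize_steps_from_retrievals retrievals max_steps
      = synthesize_steps_from_retrievals_alt retrievals max_steps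
  unfold synthesize_steps_from_retrievals synthesize_steps_from_retrievals_alt
  obtain ⟨hst, hnd⟩ := pvFold_invariant retrievals
  rw [hst]
  simp only []
  set counts := retrievals.foldl (fun d r => pvLoopB d (pvGetSteps r)) PySem.Dict.empty with hcounts
  set L := retrievals.flatMap (fun r => (pvGetSteps r).map PySem.Str.strip) with hL
  by_cases hempty : counts.items.isEmpty
  · have hkeys : counts.keys = [] := by
      simp only [PySem.Dict.keys]
      rw [List.isEmpty_iff.1 hempty]
      rfl
    rw [hkeys]
    simp [hempty, PySem.List.slice, PySem.List.sorted2]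
  · rw [if_neg (by simpa using hempty)]
    -- the max exists
    have hkne : counts.keys ≠ [] := by
      simp only [PySem.Dict.keys]
      intro h
      exact hempty (by simp [List.map_eq_nil_iff.1 h])
    have hvals : counts.values = counts.keys.map (fun k => counts.getD k 0) :=
      PySem.Dict.values_eq_map_keys counts hnd 0
    have hvne : counts.values ≠ [] := by
      rw [hvals]; simpa using hkne
    obtain ⟨m, hm⟩ : ∃ m, PySem.List.max? counts.values (fun v => v) = some m := by
      cases h : PySem.List.max? counts.values (fun v => v) with
      | none => exact absurd ((PySem.List.max?_eq_none_iff _ _).1 h) hvne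
      | some m => exact ⟨m, rfl⟩
    rw [hm]
    simp only [Option.getD_some]
    -- counts facts
    have hpos : ∀ s ∈ counts.keys, 1 ≤ counts.getD s 0 := by
      intro s hs
      have hmem : s ∈ L := by
        rcases pvCounts_keys_sub retrievals PySem.Dict.empty s (hcounts ▸ hs) with h | h
        · simp [PySem.Dict.keys_empty] at h
        · exact hL ▸ h
      have := pvCounts_getD retrievals PySem.Dict.empty s
      rw [← hcounts, ← hL] at this
      rw [this]
      have : 0 < L.count s := List.count_pos_iff.2 hmem
      simp [PySem.Dict.getD_empty]
      omega
    have hmax : ∀ s ∈ counts.keys, counts.getD s 0 ≤ m := by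
      intro s hs
      exact PySem.List.max?_isMax hm _ (by rw [hvals]; exact List.mem_map_of_mem hs)
    -- bucket lookups
    have hitems : counts.items = counts.keys.map (fun k => (k, counts.getD k 0)) :=
      PySem.Dict.items_eq_map_keys counts hnd 0
    have hbuck : ∀ c, (counts.items.foldl
          (fun b p => b.modify p.2 [] (fun l => l ++ [p.1])) PySem.Dict.empty).getD c []
        = counts.keys.filter (fun s => counts.getD s 0 == c) := by
      intro c
      rw [pvBuckets_getD, hitems]
      rw [List.filter_map, List.map_map]
      simp [Function.comp_def]
    -- assemble
    rw [PySem.List.foldl_append_eq_flatMap]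
    simp only [List.nil_append]
    rw [pvSort2_eq_packed counts.keys (fun s => counts.getD s 0)]
    rw [pvSorted_eq_buckets counts.keys (fun s => counts.getD s 0) m hnd hpos hmax]
    have hfun : (fun c => counts.keys.filter (fun s => counts.getD s 0 == c))
        = fun c => (counts.items.foldl
            (fun b p => b.modify p.2 [] (fun l => l ++ [p.1])) PySem.Dict.empty).getD c [] :=
      funext fun c => (hbuck c).symm
    rw [hfun]
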